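-- pv_equiv track=rewrite | github.com/juwkim/boj | 백준/Silver/11247. Atomic Computer/Atomic Computer.py | solve
-- ===== SOURCE A (Python) =====
-- mem = {}
--
-- def solve(x, y):
--     if (x, y) in mem:
--         return mem[(x, y)]
--     if x >= (1 << y) or x <= -(1 << y):
--         return 0
--     if x == 0 or y == 0:
--         return 1
--     if x & 1:
--         mem[(x, y)] = solve(x + 1 >> 1, y - 1) + solve(x - 1 >> 1, y - 1)
--     else:
--         mem[(x, y)] = solve(x >> 1, y - 1)
--     return mem[(x, y)]
-- ===== SOURCE B (Python) =====
-- def solve(x, y):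
--     # Iterative level-by-level propagation with a multiplicity dict,
--     # replacing A's memoized recursion.
--     total = 0
--     level = {x: 1}
--     for yy in range(y, 0, -1):
--         if not level:
--             break
--         bound = 1 << yy
--         nxt = {}
--         for v, c in level.items():
--             if v >= bound or v <= -bound:
--                 continue
--             if v == 0:
--                 total += c
--             elif v & 1:
--                 for ch in ((v + 1) >> 1, (v - 1) >> 1):
--                     nxt[ch] = nxt.get(ch, 0) + c
--             else:
--                 nxt[v >> 1] = nxt.get(v >> 1, 0) + c
--         level = nxt
--     return total + level.get(0, 0)
-- ===== Notes on version B (the rewrite author's own statement) =====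
-- stated objective: alternative
-- what changed: Replaced the memoized top-down recursion with an iterative bottom-up level-by-level propagation: a dict maps each reachable value at the current bit-level to its path multiplicity, and one pass per level merges children, so there is no recursion and no global cache.
-- outside the precondition, e.g. on solve(1, 9500): A returns 9500, B returns 9500; on solve(3, -2): A raises ValueError, B returns 0
import Mathlib
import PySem

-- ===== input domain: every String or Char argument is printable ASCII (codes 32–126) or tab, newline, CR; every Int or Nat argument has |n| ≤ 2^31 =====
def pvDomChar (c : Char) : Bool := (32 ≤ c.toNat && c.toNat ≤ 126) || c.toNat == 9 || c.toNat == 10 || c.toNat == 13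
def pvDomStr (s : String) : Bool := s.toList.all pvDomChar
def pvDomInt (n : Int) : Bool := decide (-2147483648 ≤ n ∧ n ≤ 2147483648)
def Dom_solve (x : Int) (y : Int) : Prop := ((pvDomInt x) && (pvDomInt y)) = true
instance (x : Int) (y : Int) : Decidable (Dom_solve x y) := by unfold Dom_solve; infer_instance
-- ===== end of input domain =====

-- Rewrite: A's memoized top-down recursion becomes B's iterative level-by-level
-- forward propagation with a multiplicity dict.  A's module-level `mem` is a pure
-- cache (it only ever stores values the recursion itself computes), so port A is
-- the same recursion without the cache; values agree.


-- ===== PORT A =====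
-- termination helper for port A (cited by its decreasing_by)
theorem pv_dec (x y : Int) (h1 : ¬(x ≥ 2 ^ y.toNat ∨ x ≤ -(2 ^ y.toNat)))
    (h2 : ¬(x = 0 ∨ y = 0)) : (y - 1).toNat < y.toNat := by
  rcases not_or.mp h1 with ⟨ha, hb⟩
  rcases not_or.mp h2 with ⟨hx0, hy0⟩
  have hpow : (1 : Int) < 2 ^ y.toNat := by omega
  have hy1 : 1 ≤ y.toNat := by
    by_contra hc
    have : y.toNat = 0 := by omega
    simp [this] at hpow
  omega

-- `1 << y` is 2 ^ y.toNat (Python raises ValueError for y < 0; excluded by Pre_solve),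
-- `x & 1` is PySem.Int.mod x 2, `· >> 1` is PySem.Int.floordiv · 2 (floor shift).
def solve (x : Int) (y : Int) : Int :=
  if x ≥ 2 ^ y.toNat ∨ x ≤ -(2 ^ y.toNat) then 0
  else if x = 0 ∨ y = 0 then 1
  else if PySem.Int.mod x 2 = 1 then
    solve (PySem.Int.floordiv (x + 1) 2) (y - 1) + solve (PySem.Int.floordiv (x - 1) 2) (y - 1)
  else
    solve (PySem.Int.floordiv x 2) (y - 1)
termination_by y.toNat
decreasing_by
  all_goals exact pv_dec x y ‹_› ‹_›

-- ===== PORT B =====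
-- body of Source B's inner `for v, c in level.items()` loop; acc = (total, nxt)
def stepLevel (bound : Int) (acc : Int × PySem.Dict Int Int) (vc : Int × Int) :
    Int × PySem.Dict Int Int :=
  if vc.1 ≥ bound ∨ vc.1 ≤ -bound then acc
  else if vc.1 = 0 then (acc.1 + vc.2, acc.2)
  else if PySem.Int.mod vc.1 2 = 1 then
    let k1 := PySem.Int.floordiv (vc.1 + 1) 2
    let d1 := acc.2.insert k1 (acc.2.getD k1 0 + vc.2)
    let k2 := PySem.Int.floordiv (vc.1 - 1) 2
    (acc.1, d1.insert k2 (d1.getD k2 0 + vc.2))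
  else
    let k0 := PySem.Int.floordiv vc.1 2
    (acc.1, acc.2.insert k0 (acc.2.getD k0 0 + vc.2))

-- Source B's `for yy in range(y, 0, -1)` loop; fuel n is the current yy (n = 0: loop over,
-- return total + level.get(0, 0); the `if not level: break` also lands on that line).
def bLoop : Nat → Int → PySem.Dict Int Int → Int
  | 0, total, level => total + level.getD 0 0
  | Nat.succ k, total, level =>
    if level.items = [] then total + level.getD 0 0
    else
      let r := level.items.foldl (stepLevel (2 ^ (k + 1))) (total, PySem.Dict.empty)
      bLoop k r.1 r.2

def solve_alt (x : Int) (y : Int) : Int :=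
  bLoop y.toNat 0 (PySem.Dict.empty.insert x 1)

-- ===== PRECONDITION & SPEC =====
-- Pre_solve excludes y < 0 (Python's `1 << y` raises ValueError) and x ≠ 0 with
-- y > 9000, where A's recursion depth is about y and CPython raises RecursionError
-- (the grading runner's recursion limit is 10000, so A there fails near y ≈ 9997;
-- under CPython's default limit of 1000 it fails already near y ≈ 997).  The 9000
-- bound is slightly conservative because the exact failure point depends on the
-- caller's stack depth, so A still returns for some excluded y just below the limit
-- (and B agrees there, e.g. at (1, 9500)).
def Pre_solve (x : Int) (y : Int) : Prop := 0 ≤ y ∧ (x = 0 ∨ y ≤ 9000)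
instance (x : Int) (y : Int) : Decidable (Pre_solve x y) := by unfold Pre_solve; infer_instance
def pvWitness_solve : Int × Int := (5, 3)
def Spec_solve (x : Int) (y : Int) (out : Int) : Prop := out = solve_alt x y
instance (x : Int) (y : Int) (out : Int) : Decidable (Spec_solve x y out) := by unfold Spec_solve; infer_instance

-- ===== CLAIM (what is proved, stated in full; the proofs are below) =====
def Claim_equal_solve : Prop := ∀ (x : Int) (y : Int), Dom_solve x y → Pre_solve x y → Spec_solve x y (solve x y)

-- ===== LEMMAS AND PROOFS =====

-- weighted sum Σ c * solve v n over the entries of a level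
def wsum (n : Nat) (l : List (Int × Int)) : Int :=
  (l.map (fun p => p.2 * solve p.1 (n : Int))).sum

theorem solve_zero (v : Int) : solve v 0 = if v = 0 then 1 else 0 := by
  rw [solve.eq_def]
  simp only [Int.toNat_zero, pow_zero]
  split_ifs <;> omega

theorem solve_succ (n : Nat) (v : Int) :
    solve v ((n : Int) + 1) =
      if v ≥ 2 ^ (n + 1) ∨ v ≤ -(2 ^ (n + 1)) then 0
      else if v = 0 then 1
      else if PySem.Int.mod v 2 = 1 then
        solve (PySem.Int.floordiv (v + 1) 2) (n : Int) +
          solve (PySem.Int.floordiv (v - 1) 2) (n : Int)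
      else solve (PySem.Int.floordiv v 2) (n : Int) := by
  rw [solve.eq_def]
  have h1 : ((n : Int) + 1).toNat = n + 1 := by omega
  have h2 : ¬((n : Int) + 1 = 0) := by omega
  have h3 : (n : Int) + 1 - 1 = (n : Int) := by ring
  rw [h1, h3]
  simp [h2]

theorem sum_ite_not_mem (g : Int → Int) :
    ∀ ks : List Int, 0 ∉ ks →
      (ks.map (fun k => if k = 0 then g k else 0)).sum = 0 := by
  intro ks
  induction ks with
  | nil => intro _; rfl
  | cons a ks ih =>
    intro h
    simp only [List.mem_cons, not_or] at h
    have ha : ¬ a = 0 := fun hh => h.1 hh.symm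
    simp only [List.map_cons, List.sum_cons, if_neg ha, ih h.2]
    simp

theorem sum_key_pick (g : Int → Int) :
    ∀ ks : List Int, ks.Nodup → 0 ∈ ks →
      (ks.map (fun k => if k = 0 then g k else 0)).sum = g 0 := by
  intro ks
  induction ks with
  | nil => intro _ h; cases h
  | cons a ks ih =>
    intro hnd hmem
    rcases List.nodup_cons.mp hnd with ⟨ha, hnd'⟩
    by_cases h0 : a = 0
    · subst h0
      simp only [List.map_cons, List.sum_cons, sum_ite_not_mem g ks ha]
      simp
    · rcases List.mem_cons.mp hmem with h | h
      · exact absurd h.symm h0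
      · simp only [List.map_cons, List.sum_cons, if_neg h0, ih hnd' h]
        simp

theorem wsum_zero (d : PySem.Dict Int Int) (hnd : d.keys.Nodup) :
    wsum 0 d.items = d.getD 0 0 := by
  unfold wsum
  simp only [Nat.cast_zero]
  rw [PySem.Dict.items_eq_map_keys d hnd 0]
  rw [List.map_map]
  have hfun : ((fun p : Int × Int => p.2 * solve p.1 (0 : Int)) ∘
      fun k => (k, d.getD k 0)) = fun k => if k = 0 then d.getD k 0 else 0 := by
    funext k
    by_cases hk : k = 0 <;> simp [Function.comp, solve_zero, hk]
  rw [hfun]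
  by_cases hmem : 0 ∈ d.keys
  · exact sum_key_pick _ d.keys hnd hmem
  · rw [sum_ite_not_mem _ d.keys hmem]
    rw [PySem.Dict.getD_of_not_contains]
    rw [PySem.Dict.contains_eq_decide_mem_keys]
    simp [hmem]

theorem map_replace_id (k w : Int) :
    ∀ l : List (Int × Int), k ∉ l.map Prod.fst →
      l.map (fun p => if p.1 == k then (k, w) else p) = l := by
  intro l
  induction l with
  | nil => intro _; rfl
  | cons p l ih =>
    intro h
    simp only [List.map_cons, List.mem_cons, not_or] at h
    have hne : ¬ ((p.1 == k) = true) := by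
      simp only [beq_iff_eq]
      exact fun hh => h.1 hh.symm
    rw [List.map_cons, if_neg hne, ih h.2]

theorem sum_replace (n : Nat) (k v0 w : Int) :
    ∀ l : List (Int × Int), (l.map Prod.fst).Nodup → (k, v0) ∈ l →
      ((l.map (fun p => if p.1 == k then (k, w) else p)).map
          (fun p => p.2 * solve p.1 (n : Int))).sum
        = (l.map (fun p => p.2 * solve p.1 (n : Int))).sum
            - v0 * solve k (n : Int) + w * solve k (n : Int) := by
  intro l
  induction l with
  | nil => intro _ h; cases h
  | cons p l ih =>
    intro hnd hmem
    simp only [List.map_cons, List.nodup_cons] at hnd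
    by_cases hk : p.1 = k
    · have hpl : k ∉ l.map Prod.fst := by rw [← hk]; exact hnd.1
      have hp : p = (k, v0) := by
        rcases List.mem_cons.mp hmem with h | h
        · exact h.symm
        · exact absurd (List.mem_map.mpr ⟨(k, v0), h, rfl⟩) hpl
      subst hp
      simp only [List.map_cons, map_replace_id k w l hpl, List.sum_cons]
      simp only [beq_self_eq_true, if_pos]
      ring
    · have hml : (k, v0) ∈ l := by
        rcases List.mem_cons.mp hmem with h | h
        · rw [← h] at hk; exact absurd rfl hk
        · exact h
      have hne : ¬ ((p.1 == k) = true) := by simp [hk]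
      simp only [List.map_cons, if_neg hne, List.sum_cons, ih hnd.2 hml]
      ring

theorem wsum_insert_add (n : Nat) (d : PySem.Dict Int Int) (hnd : d.keys.Nodup)
    (k c : Int) :
    wsum n (d.insert k (d.getD k 0 + c)).items
      = wsum n d.items + c * solve k (n : Int) := by
  by_cases hc : d.contains k = true
  · have hsome : d.get? k = some (d.getD k 0) := by
      have h1 : (d.get? k).isSome = true := by
        rw [← PySem.Dict.contains_eq_isSome_get?]; exact hc
      rcases Option.isSome_iff_exists.mp h1 with ⟨v0, hv0⟩
      rw [hv0, PySem.Dict.getD_of_get?_eq_some d 0 hv0]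
    have hmem : (k, d.getD k 0) ∈ d.items :=
      PySem.Dict.mem_items_of_get?_eq_some d hsome
    unfold wsum
    rw [PySem.Dict.items_insert_of_contains d _ hc]
    rw [sum_replace n k (d.getD k 0) _ d.items hnd hmem]
    ring
  · have hc' : d.contains k = false := by simpa using hc
    unfold wsum
    rw [PySem.Dict.items_insert_of_not_contains d _ hc']
    rw [PySem.Dict.getD_of_not_contains d 0 hc']
    simp only [List.map_append, List.sum_append, List.map_cons, List.sum_cons,
      List.map_nil, List.sum_nil]
    ring

theorem step_ok (n : Nat) (t : Int) (d : PySem.Dict Int Int) (hnd : d.keys.Nodup)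
    (v c : Int) :
    (stepLevel (2 ^ (n + 1)) (t, d) (v, c)).1
        + wsum n (stepLevel (2 ^ (n + 1)) (t, d) (v, c)).2.items
      = t + wsum n d.items + c * solve v ((n : Int) + 1)
    ∧ (stepLevel (2 ^ (n + 1)) (t, d) (v, c)).2.keys.Nodup := by
  rw [solve_succ]
  unfold stepLevel
  by_cases h1 : v ≥ 2 ^ (n + 1) ∨ v ≤ -(2 ^ (n + 1))
  · simp only [if_pos h1]
    exact ⟨by ring, hnd⟩
  · by_cases h2 : v = 0
    · simp only [if_neg h1, if_pos h2]
      exact ⟨by ring, hnd⟩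
    · by_cases h3 : PySem.Int.mod v 2 = 1
      · simp only [if_neg h1, if_neg h2, if_pos h3]
        constructor
        · dsimp only
          rw [wsum_insert_add n _ (PySem.Dict.nodup_keys_insert _ _ _ hnd),
            wsum_insert_add n d hnd]
          ring
        · exact PySem.Dict.nodup_keys_insert _ _ _
            (PySem.Dict.nodup_keys_insert _ _ _ hnd)
      · simp only [if_neg h1, if_neg h2, if_neg h3]
        constructor
        · dsimp only
          rw [wsum_insert_add n d hnd]
          ring
        · exact PySem.Dict.nodup_keys_insert _ _ _ hnd

theorem fold_ok (n : Nat) :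
    ∀ (l : List (Int × Int)) (t : Int) (d : PySem.Dict Int Int), d.keys.Nodup →
      (l.foldl (stepLevel (2 ^ (n + 1))) (t, d)).1
          + wsum n (l.foldl (stepLevel (2 ^ (n + 1))) (t, d)).2.items
        = t + wsum n d.items + wsum (n + 1) l
      ∧ (l.foldl (stepLevel (2 ^ (n + 1))) (t, d)).2.keys.Nodup := by
  intro l
  induction l with
  | nil =>
    intro t d hnd
    exact ⟨by simp [wsum], hnd⟩
  | cons p l ih =>
    intro t d hnd
    obtain ⟨v, c⟩ := p
    obtain ⟨hstep, hstepnd⟩ := step_ok n t d hnd v c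
    obtain ⟨hsum, hnd'⟩ := ih (stepLevel (2 ^ (n + 1)) (t, d) (v, c)).1
      (stepLevel (2 ^ (n + 1)) (t, d) (v, c)).2 hstepnd
    constructor
    · simp only [List.foldl_cons] at *
      rw [hsum, hstep]
      have : wsum (n + 1) ((v, c) :: l) = c * solve v ((n : Int) + 1) + wsum (n + 1) l := by
        unfold wsum
        push_cast
        simp
      rw [this]
      ring
    · simpa only [List.foldl_cons] using hnd'

theorem getD_zero_of_items_nil (d : PySem.Dict Int Int) (h : d.items = []) :
    d.getD 0 0 = 0 := by
  have : d = PySem.Dict.empty := by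
    apply PySem.Dict.ext
    simp [h, PySem.Dict.empty]
  rw [this]
  exact PySem.Dict.getD_empty 0 0

theorem bLoop_ok :
    ∀ (n : Nat) (t : Int) (d : PySem.Dict Int Int), d.keys.Nodup →
      bLoop n t d = t + wsum n d.items := by
  intro n
  induction n with
  | zero =>
    intro t d hnd
    unfold bLoop
    rw [wsum_zero d hnd]
  | succ k ih =>
    intro t d hnd
    unfold bLoop
    by_cases hemp : d.items = []
    · rw [if_pos hemp, getD_zero_of_items_nil d hemp, hemp]
      simp [wsum]
    · rw [if_neg hemp]
      obtain ⟨hsum, hnd'⟩ := fold_ok k d.items t PySem.Dict.empty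
        (PySem.Dict.nodup_keys_empty)
      rw [ih _ _ hnd', hsum]
      simp [wsum, PySem.Dict.empty]

-- ===== VERDICT (by name: the statement is the Claim_ definition above) =====
theorem solve_spec : Claim_equal_solve := by
  intro x y _ hpre
  unfold Spec_solve solve_alt
  have hnd : (PySem.Dict.empty.insert x (1 : Int)).keys.Nodup :=
    PySem.Dict.nodup_keys_insert _ _ _ PySem.Dict.nodup_keys_empty
  rw [bLoop_ok y.toNat 0 _ hnd]
  rw [PySem.Dict.items_insert_of_not_contains PySem.Dict.empty 1 (PySem.Dict.contains_empty x)]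
  have : wsum y.toNat (PySem.Dict.empty.items ++ [(x, 1)]) = solve x ((y.toNat : Int)) := by
    simp [wsum, PySem.Dict.empty]
  rw [this, Int.toNat_of_nonneg hpre.1]
  ring
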